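-- pv_equiv track=rewrite | github.com/vitus133/CovertMark | CovertMark/analytics/traffic.py | window_packets_fixed_size
-- ===== SOURCE A (Python) =====
-- def window_packets_fixed_size(packets, window_size):
--     """
--     Segment packets into fixed-size windows, discarding any remainder.
--
--     :param list packets: a list of parsed packets.
--     :param int window_size: the constant frame-count of each windowed segment,
--         which will be segmented in chronological order.
--     :returns: a 2-D list containing windowed packets.
--     :raises: ValueError if the fixed window size is invalid.
--     """
--
--     if not isinstance(window_size, int) or window_size < 1:
--         raise ValueError("Invalid window size.")
--
--     if len(packets) < window_size:
--         return [] # Empty list if insufficient size of input.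
--
--     segments = [packets[i:i+window_size] for i in range(0, len(packets), window_size)]
--
--     if len(segments[-1]) != window_size:
--         segments = segments[:-1]
--
--     return segments
-- ===== SOURCE B (Python) =====
-- def window_packets_fixed_size(packets, window_size):
--     if not isinstance(window_size, int) or window_size < 1:
--         raise ValueError("Invalid window size.")
--     result = []
--     current = []
--     for packet in packets:
--         current.append(packet)
--         if len(current) == window_size:
--             result.append(current)
--             current = []
--     return result
-- ===== Notes on version B (the rewrite author's own statement) =====
-- stated objective: alternative
-- what changed: Replaces the slice-comprehension-then-trim-last strategy with a single element-wise accumulator pass that emits each buffer when it reaches window_size and silently drops the trailing partial buffer.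
import Mathlib
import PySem

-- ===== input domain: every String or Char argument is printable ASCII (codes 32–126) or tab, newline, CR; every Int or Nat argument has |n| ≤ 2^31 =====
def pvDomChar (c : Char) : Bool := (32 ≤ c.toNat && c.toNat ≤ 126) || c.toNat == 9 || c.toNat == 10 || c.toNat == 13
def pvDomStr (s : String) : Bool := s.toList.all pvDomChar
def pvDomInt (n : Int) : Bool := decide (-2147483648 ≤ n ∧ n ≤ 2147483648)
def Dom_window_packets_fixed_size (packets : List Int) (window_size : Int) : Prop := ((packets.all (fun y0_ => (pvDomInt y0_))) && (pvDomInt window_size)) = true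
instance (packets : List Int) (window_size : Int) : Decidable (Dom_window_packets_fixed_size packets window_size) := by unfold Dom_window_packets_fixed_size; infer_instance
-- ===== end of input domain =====

-- B replaces A's slice-comprehension-then-trim-last strategy with a single element-wise
-- accumulator pass (same ValueError guard, trailing partial buffer silently dropped).

-- ===== PORT A =====
-- Literal port of A: guard, early return on short input, slice comprehension over
-- range(0, len, window_size), then trim the last segment if it is short.
def window_packets_fixed_size (packets : List Int) (window_size : Int) : List (List Int) :=
  if window_size < 1 then []  -- Python raises ValueError here; excluded by Pre_
  else if (packets.length : Int) < window_size then []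
  else
    let segments := (PySem.List.pyRange 0 (packets.length : Int) window_size).map
      (fun i => PySem.List.slice packets (some i) (some (i + window_size)))
    match PySem.List.pyGet? segments (-1) with
    | none => segments  -- unreachable: segments nonempty in this branch
    | some last =>
      if ((last.length : Int) ≠ window_size) then PySem.List.slice segments none (some (-1))
      else segments

-- ===== PORT B =====
-- Literal port of B: fold over the packets with (result, current) accumulator.
def window_packets_fixed_size_alt (packets : List Int) (window_size : Int) : List (List Int) :=
  if window_size < 1 then []  -- Python raises ValueError here; excluded by Pre_
  else
    (packets.foldl
      (fun (st : List (List Int) × List Int) p =>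
        let cur := st.2 ++ [p]
        if (cur.length : Int) = window_size then (st.1 ++ [cur], ([] : List Int))
        else (st.1, cur))
      ([], [])).1

-- ===== PRECONDITION & SPEC =====
-- Pre_ excludes exactly window_size < 1, where the Python A (and B) raise ValueError.
def Pre_window_packets_fixed_size (_packets : List Int) (window_size : Int) : Prop :=
  1 ≤ window_size
instance (packets : List Int) (window_size : Int) : Decidable (Pre_window_packets_fixed_size packets window_size) := by unfold Pre_window_packets_fixed_size; infer_instance

def pvWitness_window_packets_fixed_size : List Int × Int := ([1, 2, 3, 4, 5], 2)

def Spec_window_packets_fixed_size (packets : List Int) (window_size : Int) (out : List (List Int)) : Prop := out = window_packets_fixed_size_alt packets window_size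
instance (packets : List Int) (window_size : Int) (out : List (List Int)) : Decidable (Spec_window_packets_fixed_size packets window_size out) := by unfold Spec_window_packets_fixed_size; infer_instance

-- ===== CLAIM (what is proved, stated in full; the proofs are below) =====
def Claim_equal_window_packets_fixed_size : Prop := ∀ (packets : List Int) (window_size : Int), Dom_window_packets_fixed_size packets window_size → Pre_window_packets_fixed_size packets window_size → Spec_window_packets_fixed_size packets window_size (window_packets_fixed_size packets window_size)

-- ===== LEMMAS AND PROOFS =====

-- Common reference: chunk xs into blocks of n, dropping the short remainder.
def pvChunks (n : Nat) (xs : List Int) : List (List Int) :=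
  if _h : 0 < n ∧ n ≤ xs.length then xs.take n :: pvChunks n (xs.drop n) else []
termination_by xs.length
decreasing_by simp; omega

theorem pvChunks_eq_nil (n : Nat) (xs : List Int) (h : xs.length < n) :
    pvChunks n xs = [] := by
  rw [pvChunks]; rw [dif_neg]; omega

-- ---------- B side ----------

def pvBAux (n : Nat) : List Int → List Int → List (List Int)
  | _, [] => []
  | cur, p :: xs =>
    if (cur ++ [p]).length = n then (cur ++ [p]) :: pvBAux n [] xs
    else pvBAux n (cur ++ [p]) xs

theorem pvB_foldl (w : Int) (n : Nat) (hn : (n : Int) = w) :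
    ∀ (xs : List Int) (done : List (List Int)) (cur : List Int),
      (xs.foldl
        (fun (st : List (List Int) × List Int) p =>
          let c := st.2 ++ [p]
          if (c.length : Int) = w then (st.1 ++ [c], ([] : List Int)) else (st.1, c))
        (done, cur)).1 = done ++ pvBAux n cur xs := by
  intro xs
  induction xs with
  | nil => intro done cur; simp [pvBAux]
  | cons p xs ih =>
    intro done cur
    simp only [List.foldl_cons, pvBAux]
    by_cases h : (cur ++ [p]).length = n
    · rw [if_pos (by exact_mod_cast hn ▸ congrArg (Nat.cast : Nat → Int) h), if_pos h]
      rw [ih]; simp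
    · rw [if_neg (by intro hc; exact h (by exact_mod_cast hn ▸ hc)), if_neg h]
      exact ih _ _

theorem pvBAux_chunks (n : Nat) (hpos : 0 < n) :
    ∀ (xs cur : List Int), cur.length < n → pvBAux n cur xs = pvChunks n (cur ++ xs) := by
  intro xs
  induction xs with
  | nil =>
    intro cur hcur
    simp only [pvBAux, List.append_nil]
    rw [pvChunks, dif_neg]; omega
  | cons p xs ih =>
    intro cur hcur
    simp only [pvBAux]
    by_cases h : (cur ++ [p]).length = n
    · rw [if_pos h]
      rw [pvChunks, dif_pos (by simp at h ⊢; omega)]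
      have hx : cur ++ p :: xs = (cur ++ [p]) ++ xs := by simp
      refine congrArg₂ _ ?_ ?_
      · rw [hx, ← h, List.take_left]
      · rw [ih [] hpos, hx, ← h, List.drop_left]; simp
    · rw [if_neg h]
      rw [ih (cur ++ [p]) (by simp at h ⊢; omega)]
      simp

-- ---------- A side ----------

def pvSegs (w : Int) (xs : List Int) : List (List Int) :=
  (PySem.List.pyRange 0 (xs.length : Int) w).map
    (fun i => PySem.List.slice xs (some i) (some (i + w)))

def pvTrim (w : Int) (segs : List (List Int)) : List (List Int) :=
  match PySem.List.pyGet? segs (-1) with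
  | none => segs
  | some last => if ((last.length : Int) ≠ w) then segs.dropLast else segs

-- splitting off the first index of range(0, b, w)
theorem pvRange_step_cons (w b : Int) (hw : 0 < w) (hb : w ≤ b) :
    PySem.List.pyRange 0 b w = 0 :: (PySem.List.pyRange 0 (b - w) w).map (· + w) := by
  rw [PySem.List.pyRange_of_pos 0 b hw, PySem.List.pyRange_of_pos 0 (b - w) hw]
  have h1 : (b - 1) / w ≥ 0 := Int.ediv_nonneg (by omega) (by omega)
  have hcount : ((b - 0 + w - 1) / w).toNat = ((b - 1) / w).toNat + 1 := by
    have h2 : b - 0 + w - 1 = (b - 1) + 1 * w := by ring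
    rw [h2, Int.add_mul_ediv_right _ _ (by omega)]
    omega
  rw [if_pos (by omega), hcount]
  by_cases hbw : w < b
  · rw [if_pos (by omega)]
    have h3 : b - w - 0 + w - 1 = b - 1 := by ring
    rw [h3, List.range_succ_eq_map]
    simp only [List.map_cons, List.map_map, zero_add]
    refine congrArg₂ _ (by push_cast; ring) ?_
    apply List.map_congr_left; intro k _
    simp only [Function.comp_apply]
    push_cast; ring
  · -- b = w : one single index remains
    rw [if_neg (by omega)]
    have h4 : (b - 1) / w = 0 := Int.ediv_eq_zero_of_lt (by omega) (by omega)
    rw [h4]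
    simp

theorem pvSegs_nil (w : Int) (_hw : 0 < w) : pvSegs w ([] : List Int) = [] := by
  simp [pvSegs, PySem.List.pyRange]

theorem pvSegs_short (w : Int) (hw : 0 < w) (xs : List Int)
    (h0 : 0 < xs.length) (hlt : (xs.length : Int) < w) : pvSegs w xs = [xs] := by
  unfold pvSegs
  rw [PySem.List.pyRange_of_pos 0 _ hw]
  have hcount : ((xs.length : Int) - 0 + w - 1) / w = 1 := by
    have h2 : (xs.length : Int) - 0 + w - 1 = ((xs.length : Int) - 1) + 1 * w := by ring
    rw [h2, Int.add_mul_ediv_right _ _ (by omega),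
      Int.ediv_eq_zero_of_lt (by omega) (by omega)]
    norm_num
  rw [if_pos (by omega), hcount]
  norm_num
  rw [PySem.List.slice_to _ (by omega : (0:Int) ≤ w)]
  rw [List.take_of_length_le (by omega)]

theorem pvSegs_cons (w : Int) (hw : 0 < w) (xs : List Int) (hb : w ≤ (xs.length : Int)) :
    pvSegs w xs = xs.take w.toNat :: pvSegs w (xs.drop w.toNat) := by
  unfold pvSegs
  rw [pvRange_step_cons w _ hw (by omega)]
  simp only [List.map_cons, List.map_map]
  have hlen : (((xs.drop w.toNat).length : Int)) = (xs.length : Int) - w := by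
    simp; omega
  rw [hlen]
  refine congrArg₂ _ ?_ ?_
  · rw [show (0 : Int) + w = w from by ring,
      PySem.List.slice_toNat _ (le_refl 0) (by omega)]
    simp
  · apply List.map_congr_left
    intro i hi
    have hnn : 0 ≤ i := ((PySem.List.mem_pyRange_iff_of_pos hw i).mp hi).1
    simp only [Function.comp_apply]
    rw [PySem.List.slice_toNat _ (by omega) (by omega),
      PySem.List.slice_toNat _ (by omega) (by omega)]
    rw [List.drop_drop]
    exact congrArg₂ _ (by omega) (congrArg₂ _ (by omega) rfl)

theorem pvSegs_ne_nil (w : Int) (hw : 0 < w) (xs : List Int) (h0 : 0 < xs.length) :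
    pvSegs w xs ≠ [] := by
  unfold pvSegs
  rw [PySem.List.pyRange_of_pos 0 _ hw, if_pos (by omega)]
  simp only [ne_eq, List.map_eq_nil_iff, List.range_eq_nil]
  have h5 : (1:Int) ≤ ((xs.length : Int) - 0 + w - 1) / w :=
    (Int.le_ediv_iff_mul_le hw).mpr (by omega)
  omega

theorem pvTrim_cons (w : Int) (c : List Int) (segs : List (List Int)) (h : segs ≠ []) :
    pvTrim w (c :: segs) = c :: pvTrim w segs := by
  cases segs with
  | nil => exact absurd rfl h
  | cons a l =>
    simp only [pvTrim, PySem.List.pyGet?_neg_one, List.getLast?_cons, Option.getD_some]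
    split_ifs <;> simp [List.dropLast_cons₂]

theorem pvTrim_pvSegs (w : Int) (n : Nat) (hn : (n : Int) = w) (hpos : 0 < n) :
    ∀ (xs : List Int), pvTrim w (pvSegs w xs) = pvChunks n xs := by
  intro xs
  induction hind : xs.length using Nat.strong_induction_on generalizing xs with
  | _ L ih =>
  subst hind
  rcases Nat.lt_or_ge xs.length n with hlt | hge
  · rcases Nat.eq_zero_or_pos xs.length with h0 | h0
    · rw [List.length_eq_zero_iff.mp h0, pvSegs_nil w (by omega)]
      simp only [pvTrim, PySem.List.pyGet?_neg_one, List.getLast?_nil]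
      rw [pvChunks_eq_nil n [] hpos]
    · rw [pvSegs_short w (by omega) xs h0 (by omega)]
      simp only [pvTrim, PySem.List.pyGet?_neg_one, List.getLast?_singleton]
      rw [if_pos (by omega), pvChunks_eq_nil n xs hlt]
      simp
  · rw [pvSegs_cons w (by omega) xs (by omega)]
    rw [pvChunks, dif_pos (by omega)]
    have hwn : w.toNat = n := by omega
    rw [hwn]
    rcases Nat.eq_zero_or_pos (xs.drop n).length with hd0 | hd0
    · -- xs.length = n exactly: a single full segment, not trimmed
      rw [List.length_eq_zero_iff.mp hd0, pvSegs_nil w (by omega)]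
      simp only [pvTrim, PySem.List.pyGet?_neg_one, List.getLast?_singleton]
      rw [if_neg (by simp at hd0 ⊢; omega)]
      rw [pvChunks_eq_nil n [] hpos]
    · rw [pvTrim_cons w _ _ (pvSegs_ne_nil w (by omega) _ hd0)]
      rw [ih (xs.drop n).length (by simp at hd0 ⊢; omega) (xs.drop n) rfl]

-- ===== VERDICT (by name: the statement is the Claim_ definition above) =====
theorem window_packets_fixed_size_spec : Claim_equal_window_packets_fixed_size := by
  intro packets window_size _ hpre
  unfold Spec_window_packets_fixed_size
  unfold Pre_window_packets_fixed_size at hpre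
  have hn : ((window_size.toNat : Int)) = window_size := by omega
  have hpos : 0 < window_size.toNat := by omega
  have hB : window_packets_fixed_size_alt packets window_size
      = pvChunks window_size.toNat packets := by
    unfold window_packets_fixed_size_alt
    rw [if_neg (by omega),
      pvB_foldl window_size window_size.toNat hn packets [] [],
      pvBAux_chunks window_size.toNat hpos packets [] hpos]
    simp
  have hA : window_packets_fixed_size packets window_size
      = pvChunks window_size.toNat packets := by
    unfold window_packets_fixed_size
    rw [if_neg (by omega)]
    by_cases hshort : (packets.length : Int) < window_size
    · rw [if_pos hshort, pvChunks_eq_nil _ _ (by omega)]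
    · rw [if_neg hshort,
        ← pvTrim_pvSegs window_size window_size.toNat hn hpos packets]
      simp only [pvTrim, pvSegs, PySem.List.slice_to_neg_one]
  rw [hA, hB]
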